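-- pv_equiv track=rewrite | github.com/rgabrielsson/REU2025-main | Coalitions(GPT).py | get_some_pairs
-- ===== SOURCE A (Python) =====
-- def get_some_pairs(index):
--     # You could memoize these too if needed
--     ranges = range(8)
--     def valid_pair(a, b): return a + b <= 8 and a <= b
--
--     if index == 0:
--         return [(a, b) for a in ranges for b in ranges if valid_pair(a, b)]
--     if index == 1:
--         return [(a, b, c, d) for a in ranges for b in ranges for c in ranges for d in ranges
--                 if valid_pair(a, b) and valid_pair(c, d) and a+b+c+d <= 8 and a <= b and c <= d]
-- ===== SOURCE B (Python) =====
-- def get_some_pairs(index):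
--     pairs = [(a, b) for a in range(8) for b in range(8) if a + b <= 8 and a <= b]
--     if index == 0:
--         return pairs
--     if index == 1:
--         return [(a, b, c, d) for (a, b) in pairs for (c, d) in pairs if a + b + c + d <= 8]
-- ===== Notes on version B (the rewrite author's own statement) =====
-- stated objective: simpler
-- what changed: B precomputes the valid pairs table once and builds the quadruple list as a double loop over pairs-of-pairs instead of A's four-deep range loop with a repeated validity predicate.
import Mathlib
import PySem

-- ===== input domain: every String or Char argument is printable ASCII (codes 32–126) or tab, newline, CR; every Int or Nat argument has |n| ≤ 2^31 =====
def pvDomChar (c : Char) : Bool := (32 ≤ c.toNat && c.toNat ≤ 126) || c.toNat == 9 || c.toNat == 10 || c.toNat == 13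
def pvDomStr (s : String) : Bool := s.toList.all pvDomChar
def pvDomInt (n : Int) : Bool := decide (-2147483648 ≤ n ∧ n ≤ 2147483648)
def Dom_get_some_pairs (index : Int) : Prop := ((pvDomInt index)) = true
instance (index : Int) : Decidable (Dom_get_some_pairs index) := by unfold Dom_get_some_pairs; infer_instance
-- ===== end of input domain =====

set_option maxRecDepth 4000


-- B precomputes the 24 valid pairs once and combines pairs-of-pairs for index==1; simpler than A's four-deep range loop. Return-value equivalence; no mutation involved.

-- ===== PORT A =====
-- valid_pair(a, b) = a + b <= 8 and a <= b
def get_some_pairs_validPair (a b : Int) : Bool := a + b ≤ 8 && a ≤ b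

def get_some_pairs (index : Int) : Option (List (List Int)) :=
  if index = 0 then
    some ((PySem.List.pyRange 0 8 1).flatMap (fun a =>
      (PySem.List.pyRange 0 8 1).filterMap (fun b =>
        if get_some_pairs_validPair a b then some [a, b] else none)))
  else if index = 1 then
    some ((PySem.List.pyRange 0 8 1).flatMap (fun a =>
      (PySem.List.pyRange 0 8 1).flatMap (fun b =>
        (PySem.List.pyRange 0 8 1).flatMap (fun c =>
          (PySem.List.pyRange 0 8 1).filterMap (fun d =>
            if get_some_pairs_validPair a b && get_some_pairs_validPair c d
               && a + b + c + d ≤ 8 && a ≤ b && c ≤ d then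
              some [a, b, c, d]
            else none)))))
  else
    none

-- ===== PORT B =====
def get_some_pairs_alt_pairs : List (Int × Int) :=
  (PySem.List.pyRange 0 8 1).flatMap (fun a =>
    (PySem.List.pyRange 0 8 1).filterMap (fun b =>
      if a + b ≤ 8 && a ≤ b then some (a, b) else none))

def get_some_pairs_alt (index : Int) : Option (List (List Int)) :=
  if index = 0 then
    some (get_some_pairs_alt_pairs.map (fun p => [p.1, p.2]))
  else if index = 1 then
    some (get_some_pairs_alt_pairs.flatMap (fun p =>
      get_some_pairs_alt_pairs.filterMap (fun q =>
        if p.1 + p.2 + q.1 + q.2 ≤ 8 then some [p.1, p.2, q.1, q.2] else none)))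
  else
    none

-- ===== PRECONDITION & SPEC =====
def Spec_get_some_pairs (index : Int) (out : Option (List (List Int))) : Prop := out = get_some_pairs_alt index
instance (index : Int) (out : Option (List (List Int))) : Decidable (Spec_get_some_pairs index out) := by unfold Spec_get_some_pairs; infer_instance

-- ===== CLAIM (what is proved, stated in full; the proofs are below) =====
def Claim_equal_get_some_pairs : Prop := ∀ (index : Int), Dom_get_some_pairs index → Spec_get_some_pairs index (get_some_pairs index)

-- ===== LEMMAS AND PROOFS =====
theorem get_some_pairs_eq_zero : get_some_pairs 0 = get_some_pairs_alt 0 := by decide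

theorem get_some_pairs_eq_one : get_some_pairs 1 = get_some_pairs_alt 1 := by decide

-- ===== VERDICT (by name: the statement is the Claim_ definition above) =====
theorem get_some_pairs_spec : Claim_equal_get_some_pairs := by
  intro index _
  unfold Spec_get_some_pairs
  by_cases h0 : index = 0
  · subst h0; exact get_some_pairs_eq_zero
  · by_cases h1 : index = 1
    · subst h1; exact get_some_pairs_eq_one
    · simp [get_some_pairs, get_some_pairs_alt, h0, h1]
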